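-- pv_equiv track=rewrite | github.com/ZivaUrbancic/Maxout_Initializations | initialisation.py | regions_from_costs
-- ===== SOURCE A (Python) =====
-- def regions_from_costs(costs):
--     '''
--     Read cost vector and identify the start points of the regions. Return a
--     list of pairs [s_i, s_{i+1}] of start points of consecutive regions.
--
--     Parameters
--     ----------
--     costs : np array
--         Cost vector.
--
--     Returns
--     -------
--     list
--         List of pairs of start indices of consecutive regions.
--
--     '''
--
--     region_start_points = []
--     for n, c in enumerate(costs):
--         if c >= 0:
--             region_start_points += [n]
--     region_start_points += [-1]
--
--     return [[region_start_points[i],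
--              region_start_points[i+1]]
--             for i in range(len(region_start_points) - 1)]
-- ===== SOURCE B (Python) =====
-- def regions_from_costs(costs):
--     res = []
--     prev = None
--     for n, c in enumerate(costs):
--         if c >= 0:
--             if prev is not None:
--                 res.append([prev, n])
--             prev = n
--     if prev is not None:
--         res.append([prev, -1])
--     return res
-- ===== Notes on version B (the rewrite author's own statement) =====
-- stated objective: simpler
-- what changed: Fused A's two phases (collect start indices plus a -1 sentinel, then pair consecutive entries by index) into one linear pass that remembers only the previous qualifying index and emits each pair as the next start is found, with the terminal [last, -1] pair appended after the loop.
import Mathlib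
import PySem

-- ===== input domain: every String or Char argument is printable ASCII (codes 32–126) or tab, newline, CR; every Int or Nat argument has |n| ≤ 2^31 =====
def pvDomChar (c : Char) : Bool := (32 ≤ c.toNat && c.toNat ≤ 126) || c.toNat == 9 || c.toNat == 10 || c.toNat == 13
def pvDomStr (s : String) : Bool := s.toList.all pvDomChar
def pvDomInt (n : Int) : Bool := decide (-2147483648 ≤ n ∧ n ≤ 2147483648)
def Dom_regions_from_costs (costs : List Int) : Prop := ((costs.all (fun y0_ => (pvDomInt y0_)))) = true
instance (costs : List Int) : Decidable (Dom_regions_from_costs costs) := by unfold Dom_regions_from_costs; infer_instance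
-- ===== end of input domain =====

-- B fuses A's collect-then-pair two-phase scheme into one linear pass keeping only the previous qualifying index (objective: simpler).


-- ===== PORT A =====
-- A: collect the indices n with costs[n] >= 0, append the sentinel -1, then pair consecutive entries by index.
def regions_from_costs (costs : List Int) : List (List Int) :=
  let rsp := (PySem.List.enumerate costs).foldl
    (fun acc nc => if nc.2 ≥ 0 then acc ++ [nc.1] else acc) ([] : List Int)
  let rsp := rsp ++ [-1]
  (List.range (rsp.length - 1)).map (fun i => [rsp.getD i 0, rsp.getD (i+1) 0])

-- ===== PORT B =====
-- B: one pass; state = (result so far, previous qualifying index or none); this is the loop body.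
def pvStepB (s : List (List Int) × Option Int) (nc : Int × Int) : List (List Int) × Option Int :=
  if nc.2 ≥ 0 then
    ((match s.2 with
      | some p => s.1 ++ [[p, nc.1]]
      | none => s.1), some nc.1)
  else s

def regions_from_costs_alt (costs : List Int) : List (List Int) :=
  let st := (PySem.List.enumerate costs).foldl pvStepB ([], none)
  match st.2 with
  | some p => st.1 ++ [[p, -1]]
  | none => st.1

-- ===== PRECONDITION & SPEC =====
def Spec_regions_from_costs (costs : List Int) (out : List (List Int)) : Prop := out = regions_from_costs_alt costs
instance (costs : List Int) (out : List (List Int)) : Decidable (Spec_regions_from_costs costs out) := by unfold Spec_regions_from_costs; infer_instance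

-- ===== CLAIM (what is proved, stated in full; the proofs are below) =====
def Claim_equal_regions_from_costs : Prop := ∀ (costs : List Int), Dom_regions_from_costs costs → Spec_regions_from_costs costs (regions_from_costs costs)

-- ===== LEMMAS AND PROOFS =====

-- the list of qualifying indices produced from an enumerated list
def pvStarts (l : List (Int × Int)) : List Int :=
  match l with
  | [] => []
  | nc :: t => if nc.2 ≥ 0 then nc.1 :: pvStarts t else pvStarts t

-- consecutive pairs within a list (no sentinel)
def pvPairs (l : List Int) : List (List Int) :=
  match l with
  | [] => []
  | [_] => []
  | x :: y :: t => [x, y] :: pvPairs (y :: t)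

theorem pvStarts_foldl (l : List (Int × Int)) (acc : List Int) :
    l.foldl (fun acc nc => if nc.2 ≥ 0 then acc ++ [nc.1] else acc) acc = acc ++ pvStarts l := by
  induction l generalizing acc with
  | nil => simp [pvStarts]
  | cons nc t ih =>
    simp only [List.foldl_cons, pvStarts]
    split_ifs with h <;> simp [ih]

theorem pvPairs_snoc (s : List Int) (n : Int) :
    pvPairs (s ++ [n]) = pvPairs s ++ (match s.getLast? with
      | some p => [[p, n]]
      | none => []) := by
  induction s with
  | nil => simp [pvPairs]
  | cons x t ih =>
    cases t with
    | nil => simp [pvPairs]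
    | cons y u =>
      simp only [List.cons_append, pvPairs] at *
      rw [ih]
      simp [List.getLast?_cons_cons]

theorem pvB_fold (l : List (Int × Int)) (s0 : List Int) :
    l.foldl pvStepB (pvPairs s0, s0.getLast?)
    = (pvPairs (s0 ++ pvStarts l), (s0 ++ pvStarts l).getLast?) := by
  induction l generalizing s0 with
  | nil => simp [pvStarts]
  | cons nc t ih =>
    simp only [List.foldl_cons, pvStarts, pvStepB]
    split_ifs with h
    · have hstep : ((match s0.getLast? with
          | some p => pvPairs s0 ++ [[p, nc.1]]
          | none => pvPairs s0), some nc.1)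
          = (pvPairs (s0 ++ [nc.1]), (s0 ++ [nc.1]).getLast?) := by
        rw [pvPairs_snoc]
        cases hg : s0.getLast? <;> simp
      have h2 := ih (s0 ++ [nc.1])
      simp only [List.append_assoc, List.singleton_append] at h2
      rw [hstep, h2]
    · exact ih s0

theorem pvPairs_eq_range (l : List Int) :
    (List.range (l.length - 1)).map (fun i => [l.getD i 0, l.getD (i+1) 0]) = pvPairs l := by
  induction l with
  | nil => simp [pvPairs]
  | cons x t ih =>
    cases t with
    | nil => simp [pvPairs]
    | cons y u =>
      simp only [pvPairs, List.length_cons, Nat.add_sub_cancel]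
      rw [List.range_succ_eq_map, List.map_cons, List.map_map]
      simp only [List.length_cons, Nat.add_sub_cancel] at ih
      rw [← ih]
      simp [Function.comp_def]

-- ===== VERDICT (by name: the statement is the Claim_ definition above) =====
theorem regions_from_costs_spec : Claim_equal_regions_from_costs := by
  intro costs _
  unfold Spec_regions_from_costs regions_from_costs regions_from_costs_alt
  rw [pvStarts_foldl]
  have hB := pvB_fold (PySem.List.enumerate costs) []
  simp only [List.nil_append, pvPairs, List.getLast?_nil] at hB
  rw [hB]
  rw [pvPairs_eq_range]
  simp only [List.nil_append]
  rw [pvPairs_snoc (pvStarts (PySem.List.enumerate costs)) (-1)]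
  cases hg : (pvStarts (PySem.List.enumerate costs)).getLast? <;> simp
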